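-- pv_equiv track=rewrite | github.com/bo-i-od/FishonTestProjectRepository | tools/excelRead.py | get_min_value_more_than_start
-- ===== SOURCE A (Python) =====
-- def get_min_value_more_than_start(key, table_object_detail, start, long=1):
--     """
--         获得大于一个指定数能容纳连续long个数的最小数
--     """
--     json_object_list, _, _ = table_object_detail
--     existing_values = {obj[key] for obj in json_object_list if key in obj}
--
--     n = start
--     while True:
--         # 检查从n开始的long个连续数是否均未被使用
--         if all((n + i) not in existing_values for i in range(long)):
--             return n
--         n += 1
-- ===== SOURCE B (Python) =====
-- def get_min_value_more_than_start(key, table_object_detail, start, long=1):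
--     json_object_list, _, _ = table_object_detail
--     used = sorted({obj[key] for obj in json_object_list
--                    if key in obj and obj[key] >= start})
--     n = start
--     for v in used:
--         if v >= n + long:
--             break
--         n = v + 1
--     return n
-- ===== Notes on version B (the rewrite author's own statement) =====
-- stated objective: alternative
-- what changed: Instead of testing every candidate n from start with a long-wide membership probe, B sorts the distinct used values that are >= start once and makes a single scan that jumps past each blocking value, returning at the first length-long gap.
import Mathlib
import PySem

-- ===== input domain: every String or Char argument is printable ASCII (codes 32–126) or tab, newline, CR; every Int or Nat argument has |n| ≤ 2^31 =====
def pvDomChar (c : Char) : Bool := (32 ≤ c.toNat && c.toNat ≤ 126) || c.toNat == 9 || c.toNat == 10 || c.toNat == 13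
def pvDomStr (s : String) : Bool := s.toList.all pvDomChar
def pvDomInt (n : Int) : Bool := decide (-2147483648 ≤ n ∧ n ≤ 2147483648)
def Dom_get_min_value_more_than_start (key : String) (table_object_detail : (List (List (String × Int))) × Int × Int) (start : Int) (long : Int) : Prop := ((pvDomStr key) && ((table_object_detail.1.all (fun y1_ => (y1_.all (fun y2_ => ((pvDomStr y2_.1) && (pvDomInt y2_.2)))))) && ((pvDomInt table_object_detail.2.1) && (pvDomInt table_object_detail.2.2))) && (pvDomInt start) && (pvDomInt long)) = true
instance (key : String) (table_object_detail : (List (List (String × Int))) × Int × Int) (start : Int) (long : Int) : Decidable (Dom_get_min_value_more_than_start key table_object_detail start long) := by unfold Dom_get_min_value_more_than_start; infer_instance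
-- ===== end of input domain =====

-- B sorts the distinct used values ≥ start once and scans for the first length-`long` gap,
-- instead of A's probe of every candidate n from `start`; proved to return A's exact value.


-- ===== PORT A =====
-- existing_values = {obj[key] for obj in json_object_list if key in obj}
def pvExistingValues (key : String) (json_object_list : List (List (String × Int))) : PySem.Set Int :=
  PySem.Set.ofList (json_object_list.filterMap (fun obj => (PySem.Dict.mk obj).get? key))

-- all((n + i) not in existing_values for i in range(long))
def pvFreeA (existing : PySem.Set Int) (long n : Int) : Bool :=
  (PySem.List.pyRange 0 long 1).all (fun i => !(PySem.Set.contains existing (n + i)))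

-- the `while True` loop of A (terminates: any n past every existing value is free)
def pvLoopA (existing : PySem.Set Int) (long n : Int) : Int :=
  if pvFreeA existing long n then n else pvLoopA existing long (n + 1)
termination_by (1 + existing.foldl max 0 - n).toNat
decreasing_by
  rename_i h
  have hn : n ≤ existing.foldl max 0 := by
    simp only [pvFreeA, List.all_eq_true, Bool.not_eq_true'] at h
    push_neg at h
    obtain ⟨i, hi, hc⟩ := h
    rw [PySem.List.mem_pyRange_one] at hi
    rw [Bool.ne_false_iff, PySem.Set.contains_iff] at hc
    have := (PySem.List.le_foldl_max existing 0).2 (n + i) hc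
    omega
  omega

def get_min_value_more_than_start (key : String) (table_object_detail : (List (List (String × Int))) × Int × Int) (start : Int) (long : Int) : Int :=
  pvLoopA (pvExistingValues key table_object_detail.1) long start

-- ===== PORT B =====
-- for v in used: if v >= n + long: break; n = v + 1   (early break as structural recursion)
def pvScanB (long : Int) : List Int → Int → Int
  | [], n => n
  | v :: vs, n => if n + long ≤ v then n else pvScanB long vs (v + 1)

-- used = sorted({obj[key] for obj in json_object_list if key in obj and obj[key] >= start})
def get_min_value_more_than_start_alt (key : String) (table_object_detail : (List (List (String × Int))) × Int × Int) (start : Int) (long : Int) : Int :=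
  pvScanB long
    (PySem.List.sorted
      (PySem.Set.ofList
        ((table_object_detail.1.filterMap (fun obj => (PySem.Dict.mk obj).get? key)).filter
          (fun v => decide (start ≤ v))))
      (fun x => x) false)
    start

-- ===== PRECONDITION & SPEC =====
def Spec_get_min_value_more_than_start (key : String) (table_object_detail : (List (List (String × Int))) × Int × Int) (start : Int) (long : Int) (out : Int) : Prop := out = get_min_value_more_than_start_alt key table_object_detail start long
instance (key : String) (table_object_detail : (List (List (String × Int))) × Int × Int) (start : Int) (long : Int) (out : Int) : Decidable (Spec_get_min_value_more_than_start key table_object_detail start long out) := by unfold Spec_get_min_value_more_than_start; infer_instance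

-- ===== CLAIM (what is proved, stated in full; the proofs are below) =====
def Claim_equal_get_min_value_more_than_start : Prop := ∀ (key : String) (table_object_detail : (List (List (String × Int))) × Int × Int) (start : Int) (long : Int), Dom_get_min_value_more_than_start key table_object_detail start long → Spec_get_min_value_more_than_start key table_object_detail start long (get_min_value_more_than_start key table_object_detail start long)

-- ===== LEMMAS AND PROOFS =====

-- "n is free" as a statement about the used values themselves
theorem pvFreeA_iff (existing : PySem.Set Int) (long n : Int) :
    pvFreeA existing long n = true ↔ ∀ v ∈ existing, ¬(n ≤ v ∧ v < n + long) := by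
  simp only [pvFreeA, List.all_eq_true, Bool.not_eq_true']
  constructor
  · intro h v hv ⟨h1, h2⟩
    have hm : (v - n) ∈ PySem.List.pyRange 0 long 1 := by
      rw [PySem.List.mem_pyRange_one]; omega
    have := h (v - n) hm
    rw [← Bool.not_eq_true, PySem.Set.contains_iff] at this
    exact this (by simpa using hv)
  · intro h i hi
    rw [PySem.List.mem_pyRange_one] at hi
    rw [← Bool.not_eq_true, PySem.Set.contains_iff]
    intro hc
    exact h (n + i) hc ⟨by omega, by omega⟩

-- A's loop reaches any r ≥ n that is free while everything strictly between n and r is blocked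
theorem pvLoopA_reaches (existing : PySem.Set Int) (long : Int) :
    ∀ (k : Nat) (n r : Int), r - n = (k : Int) → n ≤ r →
      pvFreeA existing long r = true →
      (∀ m, n ≤ m → m < r → pvFreeA existing long m = false) →
      pvLoopA existing long n = r := by
  intro k
  induction k with
  | zero =>
    intro n r hk _ hfree _
    have : n = r := by omega
    subst this
    rw [pvLoopA, if_pos hfree]
  | succ k ih =>
    intro n r hk hle hfree hblock
    have hn : n < r := by omega
    rw [pvLoopA, if_neg (by simp [hblock n le_rfl hn])]
    exact ih (n + 1) r (by omega) (by omega) hfree (fun m h1 h2 => hblock m (by omega) h2)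

-- B's scan on a strictly increasing list of values ≥ n returns the least free value ≥ n
theorem pvScanB_spec (long : Int) :
    ∀ (vs : List Int) (n : Int), vs.Pairwise (· < ·) → (∀ v ∈ vs, n ≤ v) →
      n ≤ pvScanB long vs n ∧
      (∀ v ∈ vs, ¬(pvScanB long vs n ≤ v ∧ v < pvScanB long vs n + long)) ∧
      (∀ m, n ≤ m → m < pvScanB long vs n → ∃ v ∈ vs, m ≤ v ∧ v < m + long) := by
  intro vs
  induction vs with
  | nil =>
    intro n _ _
    refine ⟨le_rfl, by simp, ?_⟩
    intro m h1 h2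
    have : pvScanB long [] m = m := rfl
    simp only [pvScanB] at h2
    omega
  | cons v vs ih =>
    intro n hpw hge
    rcases List.pairwise_cons.mp hpw with ⟨hvlt, hpw'⟩
    by_cases hbr : n + long ≤ v
    · rw [pvScanB, if_pos hbr]
      refine ⟨le_rfl, ?_, by intro m h1 h2; omega⟩
      intro w hw
      rcases List.mem_cons.mp hw with rfl | hw
      · omega
      · have := hvlt w hw
        omega
    · rw [pvScanB, if_neg hbr]
      push_neg at hbr
      have hvn : n ≤ v := hge v (List.mem_cons_self)
      obtain ⟨h1, h2, h3⟩ := ih (v + 1) hpw' (fun w hw => by have := hvlt w hw; omega)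
      refine ⟨by omega, ?_, ?_⟩
      · intro w hw
        rcases List.mem_cons.mp hw with rfl | hw
        · omega
        · exact h2 w hw
      · intro m hm1 hm2
        by_cases hmv : m ≤ v
        · exact ⟨v, List.mem_cons_self, by omega⟩
        · obtain ⟨w, hw, hwm⟩ := h3 m (by omega) hm2
          exact ⟨w, List.mem_cons.mpr (Or.inr hw), hwm⟩

theorem get_min_value_more_than_start_spec : Claim_equal_get_min_value_more_than_start := by
  intro key tod start long _
  unfold Spec_get_min_value_more_than_start
  unfold get_min_value_more_than_start get_min_value_more_than_start_alt
  set vals := tod.1.filterMap (fun obj => (PySem.Dict.mk obj).get? key) with hvals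
  set sortedUsed := PySem.List.sorted
      (PySem.Set.ofList (vals.filter (fun v => decide (start ≤ v)))) (fun x => x) false
    with hsorted
  have hmemS : ∀ v, v ∈ sortedUsed ↔ v ∈ vals ∧ start ≤ v := by
    intro v
    rw [hsorted, PySem.List.mem_sorted, PySem.Set.mem_ofList, List.mem_filter]
    simp
  have hpw : sortedUsed.Pairwise (· < ·) := PySem.List.sorted_ofList_pairwise_lt _
  have hge : ∀ v ∈ sortedUsed, start ≤ v := fun v hv => ((hmemS v).mp hv).2
  obtain ⟨h1, h2, h3⟩ := pvScanB_spec long sortedUsed start hpw hge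
  set r := pvScanB long sortedUsed start with hr
  -- membership in A's set is membership in vals
  have hmemA : ∀ v, v ∈ pvExistingValues key tod.1 ↔ v ∈ vals := by
    intro v
    rw [pvExistingValues, PySem.Set.mem_ofList]
  refine pvLoopA_reaches _ long (r - start).toNat start r (by omega) h1 ?_ ?_
  · rw [pvFreeA_iff]
    intro v hv hint
    exact h2 v ((hmemS v).mpr ⟨(hmemA v).mp hv, by omega⟩) hint
  · intro m hm1 hm2
    rw [← Bool.not_eq_true, pvFreeA_iff]
    push_neg
    obtain ⟨v, hv, hvm⟩ := h3 m hm1 hm2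
    exact ⟨v, (hmemA v).mpr ((hmemS v).mp hv).1, hvm⟩
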